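-- pv_equiv track=rewrite | github.com/danieljhkim/DataStructures-Algorithms | python/algorithms/array/maxValueRange.py | maximumLengthOfRanges
-- ===== SOURCE A (Python) =====
-- from typing import Optional, List
--
-- def maximumLengthOfRanges(nums: List[int]) -> List[int]:
--     """
--     - for each element, find range where it is the biggest.
--     - assumption: no duplicate elements
--     """
--     N = len(nums)
--     ans = []
--     lcache = {}
--     rcache = {}
--
--     def checkLeft(i, val):
--         if i == -1:
--             return i + 1
--         if i in lcache:
--             if nums[lcache[i]] > val:
--                 return lcache[i]
--         if val < nums[i]:
--             res = i + 1
--             lcache[i] = res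
--         else:
--             res = checkLeft(i - 1, val)
--         return res
--
--     def checkRight(i, val):
--         if i == N:
--             return i - 1
--         if i in rcache:
--             if nums[rcache[i]] > val:
--                 return rcache[i]
--         if val < nums[i]:
--             res = i - 1
--             rcache[i] = res
--         else:
--             res = checkRight(i + 1, val)
--         return res
--
--     for i, n in enumerate(nums):
--         left = checkLeft(i, n)
--         right = checkRight(i, n)
--         ans.append(right - left + 1)
--     return ans
-- ===== SOURCE B (Python) =====
-- from typing import List
--
-- def maximumLengthOfRanges(nums: List[int]) -> List[int]:
--     N = len(nums)
--     left = [0] * N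
--     right = [0] * N
--     stack = []
--     for i in range(N):
--         v = nums[i]
--         while stack and nums[stack[-1]] <= v:
--             stack.pop()
--         left[i] = stack[-1] + 1 if stack else 0
--         stack.append(i)
--     stack = []
--     for i in range(N - 1, -1, -1):
--         v = nums[i]
--         while stack and nums[stack[-1]] <= v:
--             stack.pop()
--         right[i] = stack[-1] - 1 if stack else N - 1
--         stack.append(i)
--     return [r - l + 1 for l, r in zip(left, right)]
-- ===== Notes on version B (the rewrite author's own statement) =====
-- stated objective: faster
-- what changed: A's per-element recursive left/right scans (with caches that never actually fire) are replaced by two monotonic-stack passes computing previous/next strictly-greater boundaries in O(N).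
import Mathlib
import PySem

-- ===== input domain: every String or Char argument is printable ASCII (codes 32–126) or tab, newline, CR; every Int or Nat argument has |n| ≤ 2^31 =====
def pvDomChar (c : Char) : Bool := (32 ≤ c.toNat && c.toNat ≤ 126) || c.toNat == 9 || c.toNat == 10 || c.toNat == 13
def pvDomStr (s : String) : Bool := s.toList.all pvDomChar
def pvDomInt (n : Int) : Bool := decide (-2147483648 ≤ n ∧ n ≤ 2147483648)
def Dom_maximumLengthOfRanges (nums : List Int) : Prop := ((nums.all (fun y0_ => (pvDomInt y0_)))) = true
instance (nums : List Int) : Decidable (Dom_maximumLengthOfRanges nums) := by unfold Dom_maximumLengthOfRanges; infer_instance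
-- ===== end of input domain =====

-- B replaces A's per-element recursive scans (whose memo caches never actually fire) by two
-- monotonic-stack passes computing previous/next strictly-greater boundaries; objective: faster.

-- shared indexing helper: nums[i] (always called in range by both programs)
def pvG (nums : List Int) (i : Int) : Int := PySem.List.pyGetD nums i 0

-- ===== PORT A =====
-- checkLeft: Nat argument m stands for Python index i = m - 1 (m = 0 is the i == -1 base case)
def checkLeftA (nums : List Int) : Nat → Int → PySem.Dict Int Int → Int × PySem.Dict Int Int
  | 0, _, c => (0, c)
  | k+1, val, c =>
    let i : Int := (k : Int)
    match c.get? i with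
    | some cv =>
      if pvG nums cv > val then (cv, c)
      else if val < pvG nums i then (i + 1, c.insert i (i + 1))
      else checkLeftA nums k val c
    | none =>
      if val < pvG nums i then (i + 1, c.insert i (i + 1))
      else checkLeftA nums k val c

-- checkRight: Nat argument m stands for Python index i = N - m (m = 0 is the i == N base case)
def checkRightA (nums : List Int) : Nat → Int → PySem.Dict Int Int → Int × PySem.Dict Int Int
  | 0, _, c => ((nums.length : Int) - 1, c)
  | k+1, val, c =>
    let i : Int := (nums.length : Int) - ((k : Int) + 1)
    match c.get? i with
    | some cv =>
      if pvG nums cv > val then (cv, c)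
      else if val < pvG nums i then (i - 1, c.insert i (i - 1))
      else checkRightA nums k val c
    | none =>
      if val < pvG nums i then (i - 1, c.insert i (i - 1))
      else checkRightA nums k val c

-- the main loop: for i, n in enumerate(nums), threading both caches
def loopA (nums : List Int) (i : Nat) (lc rc : PySem.Dict Int Int) : List Int :=
  if h : i < nums.length then
    let n := pvG nums (i : Int)
    let L := checkLeftA nums (i + 1) n lc
    let R := checkRightA nums (nums.length - i) n rc
    (R.1 - L.1 + 1) :: loopA nums (i + 1) L.2 R.2
  else []
termination_by nums.length - i

def maximumLengthOfRanges (nums : List Int) : List Int :=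
  loopA nums 0 PySem.Dict.empty PySem.Dict.empty

-- ===== PORT B =====
-- while stack and nums[stack[-1]] <= v: stack.pop()   (stack kept top-first)
def popLE (nums : List Int) (v : Int) : List Int → List Int
  | [] => []
  | j :: rest => if pvG nums j ≤ v then popLE nums v rest else j :: rest

-- first pass (ascending): previous strictly-greater boundaries
def passL (nums : List Int) (i : Nat) (stack : List Int) : List Int :=
  if h : i < nums.length then
    let v := pvG nums (i : Int)
    let s := popLE nums v stack
    let l : Int := match s with | [] => 0 | j :: _ => j + 1
    l :: passL nums (i + 1) ((i : Int) :: s)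
  else []
termination_by nums.length - i

-- second pass (descending, argument k ranges over i = k - 1): next strictly-greater boundaries
def passR (nums : List Int) : Nat → List Int → List Int → List Int
  | 0, _, acc => acc
  | k+1, stack, acc =>
    let v := pvG nums (k : Int)
    let s := popLE nums v stack
    let r : Int := match s with | [] => (nums.length : Int) - 1 | j :: _ => j - 1
    passR nums k ((k : Int) :: s) (r :: acc)

def maximumLengthOfRanges_alt (nums : List Int) : List Int :=
  let lefts := passL nums 0 []
  let rights := passR nums nums.length [] []
  List.zipWith (fun l r => r - l + 1) lefts rights

-- ===== PRECONDITION & SPEC =====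
def Spec_maximumLengthOfRanges (nums : List Int) (out : List Int) : Prop := out = maximumLengthOfRanges_alt nums
instance (nums : List Int) (out : List Int) : Decidable (Spec_maximumLengthOfRanges nums out) := by unfold Spec_maximumLengthOfRanges; infer_instance

-- ===== CLAIM (what is proved, stated in full; the proofs are below) =====
def Claim_equal_maximumLengthOfRanges : Prop := ∀ (nums : List Int), Dom_maximumLengthOfRanges nums → Spec_maximumLengthOfRanges nums (maximumLengthOfRanges nums)

-- ===== LEMMAS AND PROOFS =====

-- the common specification: plain left/right scans
def Lsc (nums : List Int) (val : Int) : Nat → Int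
  | 0 => 0
  | k+1 => if val < pvG nums (k : Int) then (k : Int) + 1 else Lsc nums val k

def Rsc (nums : List Int) (val : Int) : Nat → Int
  | 0 => (nums.length : Int) - 1
  | k+1 =>
    let i : Int := (nums.length : Int) - ((k : Int) + 1)
    if val < pvG nums i then i - 1 else Rsc nums val k

def specF (nums : List Int) (p : Nat) : Int :=
  Rsc nums (pvG nums p) (nums.length - p - 1) - Lsc nums (pvG nums p) p + 1

-- cache invariants
def InvL (c : PySem.Dict Int Int) (p : Int) : Prop :=
  ∀ a b, c.get? a = some b → b = a + 1 ∧ a < p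

def InvR (nums : List Int) (c : PySem.Dict Int Int) : Prop :=
  ∀ a b, c.get? a = some b → b = a - 1 ∧ pvG nums (a - 1) < pvG nums a

theorem descendL (nums : List Int) (p : Int) :
    ∀ (m : Nat) (val : Int) (c : PySem.Dict Int Int), InvL c p → (m : Int) ≤ p →
      pvG nums (m : Int) ≤ val →
      (checkLeftA nums m val c).1 = Lsc nums val m ∧ InvL (checkLeftA nums m val c).2 (p + 1) := by
  intro m
  induction m with
  | zero =>
    intro val c hc _ _
    refine ⟨rfl, ?_⟩
    intro a b hab; rcases hc a b hab with ⟨h1, h2⟩; exact ⟨h1, by omega⟩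
  | succ k ih =>
    intro val c hc hm hv
    have hrec : pvG nums (k : Int) ≤ val → (checkLeftA nums k val c).1 = Lsc nums val k ∧
        InvL (checkLeftA nums k val c).2 (p + 1) := fun h => ih val c hc (by push_cast at hm ⊢; omega) h
    simp only [checkLeftA, Lsc]
    rcases hget : c.get? (k : Int) with _ | cv
    · dsimp only
      split_ifs with h1
      · refine ⟨rfl, fun a b hab => ?_⟩
        rw [PySem.Dict.get?_insert] at hab
        split_ifs at hab with he
        · subst he; cases hab; exact ⟨rfl, by push_cast at hm; omega⟩
        · rcases hc a b hab with ⟨x1, x2⟩; exact ⟨x1, by omega⟩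
      · exact hrec (by omega)
    · dsimp only
      rcases hc _ _ hget with ⟨hcv, _⟩
      have hno : ¬ pvG nums cv > val := by
        rw [hcv]; push_cast at hv; exact not_lt.mpr hv
      rw [if_neg hno]
      split_ifs with h1
      · refine ⟨rfl, fun a b hab => ?_⟩
        rw [PySem.Dict.get?_insert] at hab
        split_ifs at hab with he
        · subst he; cases hab; exact ⟨rfl, by push_cast at hm; omega⟩
        · rcases hc a b hab with ⟨x1, x2⟩; exact ⟨x1, by omega⟩
      · exact hrec (by omega)

theorem descendR (nums : List Int) :
    ∀ (m : Nat) (val : Int) (c : PySem.Dict Int Int), InvR nums c →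
      pvG nums ((nums.length : Int) - (m : Int) - 1) ≤ val →
      (checkRightA nums m val c).1 = Rsc nums val m ∧ InvR nums (checkRightA nums m val c).2 := by
  intro m
  induction m with
  | zero => intro val c hc _; exact ⟨rfl, hc⟩
  | succ k ih =>
    intro val c hc hv
    simp only [checkRightA, Rsc]
    set i : Int := (nums.length : Int) - ((k : Int) + 1) with hi
    have hicast : (nums.length : Int) - ((k+1 : Nat) : Int) - 1 = i - 1 := by push_cast; ring
    rw [hicast] at hv
    have hrec : pvG nums i ≤ val → (checkRightA nums k val c).1 = Rsc nums val k ∧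
        InvR nums (checkRightA nums k val c).2 := by
      intro h
      have : (nums.length : Int) - (k : Int) - 1 = i := by rw [hi]; ring
      exact ih val c hc (by rw [this]; exact h)
    rcases hget : c.get? i with _ | cv
    · dsimp only
      split_ifs with h1
      · refine ⟨rfl, fun a b hab => ?_⟩
        rw [PySem.Dict.get?_insert] at hab
        split_ifs at hab with he
        · cases hab; subst he; exact ⟨rfl, lt_of_le_of_lt hv h1⟩
        · exact hc a b hab
      · exact hrec (by omega)
    · dsimp only
      rcases hc _ _ hget with ⟨hcv, _⟩
      have hno : ¬ pvG nums cv > val := by rw [hcv]; exact not_lt.mpr hv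
      rw [if_neg hno]
      split_ifs with h1
      · refine ⟨rfl, fun a b hab => ?_⟩
        rw [PySem.Dict.get?_insert] at hab
        split_ifs at hab with he
        · cases hab; subst he; exact ⟨rfl, lt_of_le_of_lt hv h1⟩
        · exact hc a b hab
      · exact hrec (by omega)

theorem stepL (nums : List Int) (p : Nat) (c : PySem.Dict Int Int) (hc : InvL c (p : Int)) :
    (checkLeftA nums (p+1) (pvG nums p) c).1 = Lsc nums (pvG nums p) p ∧
    InvL (checkLeftA nums (p+1) (pvG nums p) c).2 ((p : Int) + 1) := by
  simp only [checkLeftA]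
  rcases hget : c.get? (p : Int) with _ | cv
  · dsimp only
    rw [if_neg (lt_irrefl _)]
    exact descendL nums (p : Int) p (pvG nums p) c hc le_rfl le_rfl
  · rcases hc _ _ hget with ⟨_, h2⟩; omega

theorem stepR (nums : List Int) (p : Nat) (hp : p < nums.length) (c : PySem.Dict Int Int)
    (hc : InvR nums c) :
    (checkRightA nums (nums.length - p) (pvG nums p) c).1 = Rsc nums (pvG nums p) (nums.length - p - 1) ∧
    InvR nums (checkRightA nums (nums.length - p) (pvG nums p) c).2 := by
  obtain ⟨d, hd⟩ : ∃ d, nums.length - p = d + 1 := ⟨nums.length - p - 1, by omega⟩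
  have hdp : (nums.length : Int) - ((d : Int) + 1) = (p : Int) := by omega
  rw [hd]
  simp only [checkRightA]
  rw [hdp]
  rw [Nat.add_sub_cancel]
  rcases hget : c.get? (p : Int) with _ | cv
  · dsimp only
    rw [if_neg (lt_irrefl _)]
    exact descendR nums d (pvG nums p) c hc (by rw [show (nums.length : Int) - (d:Int) - 1 = (p:Int) by omega])
  · rcases hc _ _ hget with ⟨hcv, hlt⟩
    have hno : ¬ pvG nums cv > pvG nums p := by rw [hcv]; exact not_lt.mpr (le_of_lt hlt)
    dsimp only
    rw [if_neg hno, if_neg (lt_irrefl _)]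
    exact descendR nums d (pvG nums p) c hc (by rw [show (nums.length : Int) - (d:Int) - 1 = (p:Int) by omega])

theorem loopA_eq (nums : List Int) :
    ∀ (fuel : Nat) (i : Nat) (lc rc : PySem.Dict Int Int), nums.length - i ≤ fuel →
      InvL lc (i : Int) → InvR nums rc →
      loopA nums i lc rc = (List.range' i (nums.length - i)).map (specF nums) := by
  intro fuel
  induction fuel with
  | zero =>
    intro i lc rc hf _ _
    rw [loopA, dif_neg (by omega), show nums.length - i = 0 by omega]
    rfl
  | succ f ih =>
    intro i lc rc hf hl hr
    rw [loopA]
    by_cases h : i < nums.length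
    · rw [dif_pos h]
      dsimp only
      obtain ⟨hL1, hL2⟩ := stepL nums i lc hl
      obtain ⟨hR1, hR2⟩ := stepR nums i h rc hr
      have hl' : InvL (checkLeftA nums (i+1) (pvG nums i) lc).2 ((i+1 : Nat) : Int) := by
        push_cast; exact hL2
      rw [ih (i+1) _ _ (by omega) hl' hR2]
      conv_rhs => rw [show nums.length - i = (nums.length - (i+1)) + 1 by omega, List.range'_succ]
      simp only [List.map_cons]
      congr 1
      rw [hL1, hR1]
      simp only [specF]
    · rw [dif_neg h, show nums.length - i = 0 by omega]; rfl

-- B side: the stack invariant is exactly "popping the stack computes the scan"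
def popScanL (nums : List Int) (s : List Int) (v : Int) : Int :=
  match popLE nums v s with | [] => 0 | j :: _ => j + 1

def popScanR (nums : List Int) (s : List Int) (v : Int) : Int :=
  match popLE nums v s with | [] => (nums.length : Int) - 1 | j :: _ => j - 1

theorem popLE_popLE (nums : List Int) (v w : Int) (hw : w ≤ v) :
    ∀ s, popLE nums v (popLE nums w s) = popLE nums v s := by
  intro s
  induction s with
  | nil => rfl
  | cons j rest ih =>
    simp only [popLE]
    by_cases h : pvG nums j ≤ w
    · rw [if_pos h, if_pos (le_trans h hw), ih]
    · rw [if_neg h]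
      simp only [popLE]

theorem stackStepL (nums : List Int) (i : Nat) (s : List Int)
    (hs : ∀ v, popScanL nums s v = Lsc nums v i) :
    ∀ v, popScanL nums ((i : Int) :: popLE nums (pvG nums i) s) v = Lsc nums v (i + 1) := by
  intro v
  simp only [popScanL, popLE, Lsc]
  by_cases h : pvG nums (i : Int) ≤ v
  · rw [if_pos h, popLE_popLE nums v (pvG nums i) h s, if_neg (not_lt.mpr h)]
    exact hs v
  · rw [if_neg h, if_pos (not_le.mp h)]

theorem passL_eq (nums : List Int) :
    ∀ (fuel : Nat) (i : Nat) (s : List Int), nums.length - i ≤ fuel →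
      (∀ v, popScanL nums s v = Lsc nums v i) →
      passL nums i s = (List.range' i (nums.length - i)).map (fun p : Nat => Lsc nums (pvG nums (p : Int)) p) := by
  intro fuel
  induction fuel with
  | zero =>
    intro i s hf _
    rw [passL, dif_neg (by omega), show nums.length - i = 0 by omega]; rfl
  | succ f ih =>
    intro i s hf hs
    rw [passL]
    by_cases h : i < nums.length
    · rw [dif_pos h]
      dsimp only
      rw [ih (i+1) _ (by omega) (stackStepL nums i s hs)]
      conv_rhs => rw [show nums.length - i = (nums.length - (i+1)) + 1 by omega, List.range'_succ]
      simp only [List.map_cons]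
      congr 1
      exact hs (pvG nums (i : Int))
    · rw [dif_neg h, show nums.length - i = 0 by omega]; rfl

theorem stackStepR (nums : List Int) (k : Nat) (hk : k < nums.length) (s : List Int)
    (hs : ∀ v, popScanR nums s v = Rsc nums v (nums.length - (k + 1))) :
    ∀ v, popScanR nums ((k : Int) :: popLE nums (pvG nums k) s) v = Rsc nums v (nums.length - k) := by
  intro v
  obtain ⟨d, hd⟩ : ∃ d, nums.length - k = d + 1 := ⟨nums.length - k - 1, by omega⟩
  have hdk : nums.length - (k + 1) = d := by omega
  rw [hd]
  simp only [popScanR, popLE, Rsc]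
  have hik : (nums.length : Int) - ((d : Int) + 1) = (k : Int) := by omega
  rw [hik]
  by_cases h : pvG nums (k : Int) ≤ v
  · rw [if_pos h, popLE_popLE nums v (pvG nums k) h s, if_neg (not_lt.mpr h)]
    have := hs v
    simp only [popScanR] at this
    rw [← hdk]; exact this
  · rw [if_neg h, if_pos (not_le.mp h)]

theorem passR_eq (nums : List Int) :
    ∀ (k : Nat) (s acc : List Int), k ≤ nums.length →
      (∀ v, popScanR nums s v = Rsc nums v (nums.length - k)) →
      passR nums k s acc
        = ((List.range k).map (fun p : Nat => Rsc nums (pvG nums (p : Int)) (nums.length - p - 1))) ++ acc := by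
  intro k
  induction k with
  | zero => intro s acc _ _; rfl
  | succ k ih =>
    intro s acc hk hs
    simp only [passR]
    rw [ih _ _ (by omega) (stackStepR nums k (by omega) s hs)]
    rw [List.range_succ, List.map_append]
    simp only [List.map_cons, List.map_nil]
    rw [List.append_assoc, List.singleton_append]
    rw [show nums.length - k - 1 = nums.length - (k + 1) by omega]
    exact congrArg (fun r => List.map (fun p : Nat => Rsc nums (pvG nums (p : Int)) (nums.length - p - 1)) (List.range k) ++ r :: acc) (hs (pvG nums (k : Int)))

theorem zipWith_map_same {α β γ : Type} (f : β → γ → α) (g : Nat → β) (h : Nat → γ) :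
    ∀ l : List Nat, List.zipWith f (l.map g) (l.map h) = l.map (fun x => f (g x) (h x)) := by
  intro l
  induction l with
  | nil => rfl
  | cons x xs ih => simp only [List.map_cons, List.zipWith_cons_cons, ih]

theorem alt_eq (nums : List Int) :
    maximumLengthOfRanges_alt nums = (List.range nums.length).map (specF nums) := by
  unfold maximumLengthOfRanges_alt
  rw [passL_eq nums nums.length 0 [] (by omega) (by intro v; simp [popScanL, popLE, Lsc])]
  rw [passR_eq nums nums.length [] [] le_rfl (by
    intro v
    simp only [popScanR, popLE, Nat.sub_self, Rsc])]
  rw [List.append_nil, Nat.sub_zero, ← List.range_eq_range']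
  rw [zipWith_map_same]
  unfold specF
  rfl

theorem a_eq (nums : List Int) :
    maximumLengthOfRanges nums = (List.range nums.length).map (specF nums) := by
  unfold maximumLengthOfRanges
  rw [loopA_eq nums nums.length 0 _ _ (by omega)
    (by intro a b hab; simp [PySem.Dict.get?_empty] at hab)
    (by intro a b hab; simp [PySem.Dict.get?_empty] at hab)]
  rw [Nat.sub_zero, ← List.range_eq_range']

-- ===== VERDICT (by name: the statement is the Claim_ definition above) =====
theorem maximumLengthOfRanges_spec : Claim_equal_maximumLengthOfRanges := by
  intro nums _
  unfold Spec_maximumLengthOfRanges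
  rw [a_eq, alt_eq]
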